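-- pv_equiv track=rewrite | github.com/zp002/Visualize_Speech | visualizeText.py | countFrequenciesAccurateHelper
-- ===== SOURCE A (Python) =====
-- def countFrequenciesAccurateHelper(rList, fList):
--     #more accurate but way slower
--     '''countFrequenciesAccurateHelper counts the total frequencies of each
--         word in rList that appears in fList. It is a hepler function for
--
-- 	Inputs: rList: (list) a list representing the words for an region
-- 	        fList: (list) the modified list of all the words in the SOU
-- 	        speech of a President
-- 	Output: (int) the total frequencies of each word in rList that appears
--                 in fList
--
-- 	doctest:
--         >>> fList = ["i","not","i","kid","i","sure","ice", "cream","ice", "i","cream"]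
--         >>> rList = ["i","kid","sure","ice cream"]
--         >>> countFrequenciesAccurateHelper(rList, fList)
--         7
--         >>> rList = ["i","kid","sure","ice cream"]
--         >>> fList = ["i","not","i","kid","i","sure","ice", "cream","ice", "i","cream","ice"]
--         >>> countFrequenciesAccurateHelper(rList, fList)
--         7
--     '''
--     freq = 0
--     i = 0
--     while i< len(fList):
--         for names in rList:
--             if " " not in names:
--                 if names == fList[i]:
--                     freq += 1
--             elif " " in names:
--                 nameList = names.split()
--                 if len(fList) - i >= len(nameList):
--                     if fList[i] == nameList[0]:
--                         j = 0
--                         isSameSequence = True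
--                         while j < len(nameList):
--                             if fList[i+j] != nameList[j]:
--                                 isSameSequence = False
--                                 break
--                             else:
--                                 j += 1
--                         if isSameSequence:
--                             freq += 1
--         i += 1
--     return freq
-- ===== SOURCE B (Python) =====
-- def countFrequenciesAccurateHelper(rList, fList):
--     positions = {}
--     for idx, w in enumerate(fList):
--         positions.setdefault(w, []).append(idx)
--     total = 0
--     for name in rList:
--         if " " not in name:
--             total += len(positions.get(name, []))
--         else:
--             parts = name.split()
--             starts = set(positions.get(parts[0], []))
--             for k in range(1, len(parts)):
--                 starts &= {q - k for q in positions.get(parts[k], [])}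
--             total += len(starts)
--     return total
-- ===== Notes on version B (the rewrite author's own statement) =====
-- stated objective: faster
-- what changed: B builds an inverted index from each word to its list of positions in fList once, answers each single word by the length of its position list, and counts a multi-word phrase by intersecting the shifted position sets of its words, instead of A's rescan of all of rList with an inner sequence-compare at every position of fList.
-- outside the precondition, e.g. on countFrequenciesAccurateHelper([' '], []): A returns 0, B raises IndexError
import Mathlib
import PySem

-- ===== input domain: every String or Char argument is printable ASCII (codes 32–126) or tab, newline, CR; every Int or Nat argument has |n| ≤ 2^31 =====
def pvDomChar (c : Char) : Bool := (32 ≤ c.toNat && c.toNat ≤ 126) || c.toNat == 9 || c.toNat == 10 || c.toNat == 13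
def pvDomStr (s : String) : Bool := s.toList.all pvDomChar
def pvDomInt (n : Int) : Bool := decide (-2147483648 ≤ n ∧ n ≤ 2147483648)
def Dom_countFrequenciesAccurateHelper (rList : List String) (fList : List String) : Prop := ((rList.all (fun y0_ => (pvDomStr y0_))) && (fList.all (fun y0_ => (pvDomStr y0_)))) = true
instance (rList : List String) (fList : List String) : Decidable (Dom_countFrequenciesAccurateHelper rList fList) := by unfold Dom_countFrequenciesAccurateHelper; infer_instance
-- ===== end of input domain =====

-- B replaces A's position-by-position rescan of rList by an inverted index: one dict from word to
-- its list of positions in fList, single words answered by the length of their position list and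
-- each phrase counted by intersecting the shifted position sets of its words; return value only.

-- ===== PORT A =====
-- inner 'while j < len(nameList)' sequence check of A
def aMatch (fList nameList : List String) (i : Int) (j : Nat) : Bool :=
  if h : j < nameList.length then
    if PySem.List.pyGetD fList (i + (j : Int)) "" ≠ nameList[j] then false
    else aMatch fList nameList i (j + 1)
  else true
termination_by nameList.length - j

-- body of A's 'for names in rList' at position i
def aStep (fList : List String) (i : Int) (freq : Int) (names : String) : Int :=
  if ¬ (PySem.Str.isIn " " names = true) then
    if names = PySem.List.pyGetD fList i "" then freq + 1 else freq
  else if PySem.Str.isIn " " names = true then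
    let nameList := PySem.Str.split₀ names
    if (fList.length : Int) - i ≥ (nameList.length : Int) then
      if PySem.List.pyGetD fList i "" = PySem.List.pyGetD nameList 0 "" then
        if aMatch fList nameList i 0 then freq + 1 else freq
      else freq
    else freq
  else freq

def countFrequenciesAccurateHelper (rList : List String) (fList : List String) : Int :=
  (PySem.List.pyRange 0 (fList.length : Int)).foldl
    (fun freq i => rList.foldl (fun f names => aStep fList i f names) freq) 0

-- ===== PORT B =====
-- 'positions' dict: word ↦ list of its indices in fList, built once by the enumerate loop
def posIndex (fList : List String) : PySem.Dict String (List Int) :=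
  (PySem.List.enumerate fList).foldl
    (fun d p => d.insert p.2 (d.getD p.2 [] ++ [p.1])) PySem.Dict.empty

def countFrequenciesAccurateHelper_alt (rList : List String) (fList : List String) : Int :=
  let positions := posIndex fList
  rList.foldl (fun total name =>
    if ¬ (PySem.Str.isIn " " name = true) then
      total + ((positions.getD name []).length : Int)
    else
      let parts := PySem.Str.split₀ name
      total + PySem.Set.len
        ((PySem.List.pyRange 1 (parts.length : Int)).foldl
          (fun s k => PySem.Set.inter s
            (PySem.Set.ofList ((positions.getD (PySem.List.pyGetD parts k "") []).map (fun q => q - k))))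
          (PySem.Set.ofList (positions.getD (PySem.List.pyGetD parts 0 "") []))))
    0

-- ===== PRECONDITION & SPEC =====
-- Pre_ excludes rLists containing a whitespace-only name (it contains ' ' but splits to []):
-- there A raises IndexError on every nonempty fList, and its value 0 on an empty fList is a
-- degenerate corner of that crash (B raises IndexError on parts[0] there as well).
def Pre_countFrequenciesAccurateHelper (rList : List String) (fList : List String) : Prop :=
  ∀ name ∈ rList, PySem.Str.isIn " " name = true → PySem.Str.split₀ name ≠ []
instance (rList : List String) (fList : List String) : Decidable (Pre_countFrequenciesAccurateHelper rList fList) := by unfold Pre_countFrequenciesAccurateHelper; infer_instance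

def pvWitness_countFrequenciesAccurateHelper : List String × List String :=
  (["i", "kid", "sure", "ice cream"], ["i", "not", "i", "kid", "i", "sure", "ice", "cream", "ice", "i", "cream"])

def Spec_countFrequenciesAccurateHelper (rList : List String) (fList : List String) (out : Int) : Prop := out = countFrequenciesAccurateHelper_alt rList fList
instance (rList : List String) (fList : List String) (out : Int) : Decidable (Spec_countFrequenciesAccurateHelper rList fList out) := by unfold Spec_countFrequenciesAccurateHelper; infer_instance

-- ===== CLAIM (what is proved, stated in full; the proofs are below) =====
def Claim_equal_countFrequenciesAccurateHelper : Prop := ∀ (rList : List String) (fList : List String), Dom_countFrequenciesAccurateHelper rList fList → Pre_countFrequenciesAccurateHelper rList fList → Spec_countFrequenciesAccurateHelper rList fList (countFrequenciesAccurateHelper rList fList)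

-- ===== LEMMAS AND PROOFS =====

-- per-(position, name) contribution of A's inner loop body
def deltaA (fList : List String) (name : String) (i : Int) : Int := aStep fList i 0 name

-- B's per-name term (the alt fold's step, with the positions dict named)
def bTermB (fList : List String) (name : String) : Int :=
  if ¬ (PySem.Str.isIn " " name = true) then (((posIndex fList).getD name []).length : Int)
  else
    let parts := PySem.Str.split₀ name
    PySem.Set.len
      ((PySem.List.pyRange 1 (parts.length : Int)).foldl
        (fun s k => PySem.Set.inter s
          (PySem.Set.ofList (((posIndex fList).getD (PySem.List.pyGetD parts k "") []).map (fun q => q - k))))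
        (PySem.Set.ofList ((posIndex fList).getD (PySem.List.pyGetD parts 0 "") [])))

lemma aStep_add (fList : List String) (i freq : Int) (names : String) :
    aStep fList i freq names = freq + deltaA fList names i := by
  simp only [aStep, deltaA]; split_ifs <;> ring

lemma A_eq_sum (rList fList : List String) :
    countFrequenciesAccurateHelper rList fList
      = ((PySem.List.pyRange 0 (fList.length : Int)).map
          (fun i => (rList.map (fun name => deltaA fList name i)).sum)).sum := by
  unfold countFrequenciesAccurateHelper
  have hin : ∀ (freq : Int) (i : Int),
      rList.foldl (fun f names => aStep fList i f names) freq
        = freq + (rList.map (fun name => deltaA fList name i)).sum := by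
    intro freq i
    have : (fun f names => aStep fList i f names)
        = (fun (f : Int) names => f + deltaA fList names i) := by
      funext f nm; exact aStep_add fList i f nm
    rw [this, PySem.List.foldl_add]
  have : (fun (freq : Int) i => rList.foldl (fun f names => aStep fList i f names) freq)
      = (fun (freq : Int) i => freq + (rList.map (fun name => deltaA fList name i)).sum) := by
    funext freq i; exact hin freq i
  rw [this, PySem.List.foldl_add]
  simp

lemma sum_comm_list {α β : Type} (xs : List α) (ys : List β) (f : α → β → Int) :
    (ys.map (fun y => (xs.map (fun x => f x y)).sum)).sum
      = (xs.map (fun x => (ys.map (fun y => f x y)).sum)).sum := by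
  induction ys with
  | nil => simp
  | cons y t ih =>
      simp only [List.map_cons, List.sum_cons, ih]
      rw [← PySem.List.sum_map_add_int]

lemma B_eq_sum (rList fList : List String) :
    countFrequenciesAccurateHelper_alt rList fList
      = (rList.map (fun name => bTermB fList name)).sum := by
  have h1 : countFrequenciesAccurateHelper_alt rList fList
      = rList.foldl (fun (total : Int) name =>
          if ¬ (PySem.Str.isIn " " name = true) then
            total + (((posIndex fList).getD name []).length : Int)
          else
            total + PySem.Set.len
              ((PySem.List.pyRange 1 ((PySem.Str.split₀ name).length : Int)).foldl
                (fun s k => PySem.Set.inter s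
                  (PySem.Set.ofList (((posIndex fList).getD (PySem.List.pyGetD (PySem.Str.split₀ name) k "") []).map (fun q => q - k))))
                (PySem.Set.ofList ((posIndex fList).getD (PySem.List.pyGetD (PySem.Str.split₀ name) 0 "") [])))) 0 := rfl
  rw [h1]
  have hstep : (fun (total : Int) name =>
      if ¬ (PySem.Str.isIn " " name = true) then
        total + (((posIndex fList).getD name []).length : Int)
      else
        total + PySem.Set.len
          ((PySem.List.pyRange 1 ((PySem.Str.split₀ name).length : Int)).foldl
            (fun s k => PySem.Set.inter s
              (PySem.Set.ofList (((posIndex fList).getD (PySem.List.pyGetD (PySem.Str.split₀ name) k "") []).map (fun q => q - k))))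
            (PySem.Set.ofList ((posIndex fList).getD (PySem.List.pyGetD (PySem.Str.split₀ name) 0 "") []))))
      = (fun (total : Int) name => total + bTermB fList name) := by
    funext total name
    simp only [bTermB]
    split_ifs <;> rfl
  rw [hstep, PySem.List.foldl_add]
  simp

-- the positions-dict fold, characterised over any prefix of pairs
lemma posFold_getD (ps : List (Int × String)) (d : PySem.Dict String (List Int)) (v : String) :
    (ps.foldl (fun d p => d.insert p.2 (d.getD p.2 [] ++ [p.1])) d).getD v []
      = d.getD v [] ++ ((ps.filter (fun p => p.2 == v)).map (fun p => p.1)) := by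
  induction ps generalizing d with
  | nil => simp
  | cons p t ih =>
      simp only [List.foldl_cons, List.filter_cons, ih, PySem.Dict.getD_insert]
      by_cases hv : v = p.2
      · simp [hv]
      · have : ¬ (p.2 == v) = true := by simpa using fun h => hv h.symm
        simp [hv, this]

lemma posIndex_getD (fList : List String) (v : String) :
    (posIndex fList).getD v []
      = (PySem.List.pyRange 0 (fList.length : Int)).filter
          (fun j => PySem.List.pyGetD fList j "" == v) := by
  unfold posIndex
  rw [posFold_getD, PySem.List.enumerate_eq_map_pyRange fList ""]
  simp [List.filter_map, List.map_map, Function.comp_def]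

lemma mem_posIndex (fList : List String) (v : String) (x : Int) :
    x ∈ (posIndex fList).getD v []
      ↔ 0 ≤ x ∧ x < (fList.length : Int) ∧ PySem.List.pyGetD fList x "" = v := by
  rw [posIndex_getD, List.mem_filter, PySem.List.mem_pyRange_one, beq_iff_eq]
  tauto

lemma nodup_posIndex (fList : List String) (v : String) :
    ((posIndex fList).getD v []).Nodup := by
  rw [posIndex_getD]
  exact (PySem.List.nodup_pyRange_one 0 _).filter _

-- Python's chained 'starts &= …' is a conjunction of membership filters
lemma foldl_inter_filter (ks : List Int) (s : List Int) (F : Int → List Int) :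
    ks.foldl (fun s k => PySem.Set.inter s (PySem.Set.ofList (F k))) s
      = s.filter (fun p => ks.all (fun k => (PySem.Set.ofList (F k)).contains p)) := by
  induction ks generalizing s with
  | nil => simp
  | cons k t ih =>
      simp only [List.foldl_cons, ih]
      rw [show PySem.Set.inter s (PySem.Set.ofList (F k))
            = s.filter (fun p => (PySem.Set.ofList (F k)).contains p) from rfl]
      rw [List.filter_filter]
      congr 1
      funext p
      simp [Bool.and_comm]

lemma contains_F_iff (fList parts : List String) (k i : Int) :
    ((PySem.Set.ofList (((posIndex fList).getD (PySem.List.pyGetD parts k "") []).map (fun q => q - k))).contains i) = true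
      ↔ 0 ≤ i + k ∧ i + k < (fList.length : Int)
          ∧ PySem.List.pyGetD fList (i + k) "" = PySem.List.pyGetD parts k "" := by
  rw [PySem.Set.contains_iff, PySem.Set.mem_ofList, List.mem_map]
  constructor
  · rintro ⟨q, hq, hqe⟩
    have hq' := (mem_posIndex fList _ q).mp hq
    have hik : i + k = q := by omega
    exact ⟨by omega, by omega, by rw [hik]; exact hq'.2.2⟩
  · rintro ⟨h1, h2, h3⟩
    exact ⟨i + k, (mem_posIndex fList _ (i + k)).mpr ⟨h1, h2, h3⟩, by ring⟩

lemma aMatch_iff (fList parts : List String) (i : Int) (hi : 0 ≤ i) (j : Nat) :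
    aMatch fList parts i j = true
      ↔ ∀ k, j ≤ k → k < parts.length → fList.getD (i.toNat + k) "" = parts.getD k "" := by
  have hget : ∀ k : Nat, PySem.List.pyGetD fList (i + (k : Int)) "" = fList.getD (i.toNat + k) "" := by
    intro k
    rw [PySem.List.pyGetD_of_nonneg fList "" (by omega)]
    congr 1
    omega
  generalize hfuel : parts.length - j = fuel
  induction fuel generalizing j with
  | zero =>
      have hj : ¬ j < parts.length := by omega
      rw [aMatch]
      simp only [dif_neg hj]
      constructor
      · intro _ k hjk hk; omega
      · intro _; trivial
  | succ n ih =>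
      have hj : j < parts.length := by omega
      rw [aMatch]
      simp only [dif_pos hj]
      by_cases hx : PySem.List.pyGetD fList (i + (j : Int)) "" = parts[j]
      · have hih := ih (j + 1) (by omega)
        rw [if_neg (not_not_intro hx)]
        constructor
        · intro ham k hjk hk
          rcases Nat.eq_or_lt_of_le hjk with heq | hlt
          · subst heq
            rw [← hget j, hx, List.getD_eq_getElem parts "" hk]
          · exact hih.mp ham k hlt hk
        · intro hall
          exact hih.mpr (fun k hjk hk => hall k (by omega) hk)
      · rw [if_pos hx]
        constructor
        · intro hff; exact absurd hff (by simp)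
        · intro hall
          exact absurd (by rw [hget j, hall j (le_refl j) hj, List.getD_eq_getElem parts "" hj]) hx

lemma slice_eq_iff (fList parts : List String) (i : Int) (hi : 0 ≤ i)
    (hm : i + (parts.length : Int) ≤ (fList.length : Int)) :
    PySem.List.slice fList (some i) (some (i + (parts.length : Int))) = parts
      ↔ ∀ k, k < parts.length → fList.getD (i.toNat + k) "" = parts.getD k "" := by
  have ha : i.toNat + parts.length ≤ fList.length := by omega
  rw [PySem.List.slice_toNat fList hi (by omega)]
  have htn : (i + (parts.length : Int)).toNat - i.toNat = parts.length := by omega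
  rw [htn]
  have hlen : (List.take parts.length (List.drop i.toNat fList)).length = parts.length := by
    simp [List.length_take, List.length_drop]
    omega
  constructor
  · intro heq k hk
    have h1 : i.toNat + k < fList.length := by omega
    rw [List.getD_eq_getElem fList "" h1, List.getD_eq_getElem parts "" hk]
    have h2 : k < (List.take parts.length (List.drop i.toNat fList)).length := by omega
    calc fList[i.toNat + k] = (List.take parts.length (List.drop i.toNat fList))[k] := by
          rw [List.getElem_take (h := h2), List.getElem_drop]
      _ = parts[k] := by simp [heq]
  · intro hall
    apply List.ext_getElem (by rw [hlen])
    intro k h1 h2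
    have hk : k < parts.length := by omega
    have h3 : i.toNat + k < fList.length := by omega
    have := hall k hk
    rw [List.getD_eq_getElem fList "" h3, List.getD_eq_getElem parts "" hk] at this
    rw [List.getElem_take (h := by omega), List.getElem_drop]
    exact this

-- A's per-position phrase test (bounds + slice equality) ↔ B's filter predicate at that position
lemma cond_iff (fList parts : List String) (hne : parts ≠ []) (i : Int)
    (h0 : 0 ≤ i) (hn : i < (fList.length : Int)) :
    (i + (parts.length : Int) ≤ (fList.length : Int)
        ∧ PySem.List.slice fList (some i) (some (i + (parts.length : Int))) = parts)
      ↔ ((PySem.List.pyRange 1 (parts.length : Int)).all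
            (fun k => (PySem.Set.ofList (((posIndex fList).getD (PySem.List.pyGetD parts k "") []).map (fun q => q - k))).contains i)
          && (PySem.List.pyGetD fList i "" == PySem.List.pyGetD parts 0 "")) = true := by
  have hm : 0 < parts.length := List.length_pos_iff.mpr hne
  rw [Bool.and_eq_true, List.all_eq_true, beq_iff_eq]
  constructor
  · rintro ⟨hle, hs⟩
    have hall := (slice_eq_iff fList parts i h0 hle).mp hs
    have hgen : ∀ k : Int, 0 ≤ k → k < (parts.length : Int) →
        PySem.List.pyGetD fList (i + k) "" = PySem.List.pyGetD parts k "" := by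
      intro k hk1 hk2
      have hkN : k.toNat < parts.length := by omega
      have := hall k.toNat hkN
      rw [PySem.List.pyGetD_of_nonneg fList "" (by omega),
          PySem.List.pyGetD_of_nonneg parts "" hk1]
      have h1 : (i + k).toNat = i.toNat + k.toNat := by omega
      rw [h1]; exact this
    constructor
    · intro k hk
      obtain ⟨hk1, hk2⟩ := PySem.List.mem_pyRange_one.mp hk
      rw [contains_F_iff]
      exact ⟨by omega, by omega, hgen k (by omega) hk2⟩
    · simpa using hgen 0 le_rfl (by exact_mod_cast hm)
  · rintro ⟨hks, h0eq⟩
    have hallI : ∀ k : Int, 0 ≤ k → k < (parts.length : Int) →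
        i + k < (fList.length : Int)
          ∧ PySem.List.pyGetD fList (i + k) "" = PySem.List.pyGetD parts k "" := by
      intro k hk1 hk2
      rcases eq_or_lt_of_le hk1 with h | hpos
      · refine ⟨by omega, ?_⟩
        rw [← h, add_zero]; exact h0eq
      · have hmem : k ∈ PySem.List.pyRange 1 (parts.length : Int) :=
          PySem.List.mem_pyRange_one.mpr ⟨by omega, hk2⟩
        have := (contains_F_iff fList parts k i).mp (hks k hmem)
        exact ⟨this.2.1, this.2.2⟩
    have hle : i + (parts.length : Int) ≤ (fList.length : Int) := by
      have := (hallI ((parts.length : Int) - 1) (by omega) (by omega)).1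
      omega
    refine ⟨hle, (slice_eq_iff fList parts i h0 hle).mpr ?_⟩
    intro k hk
    have := (hallI (k : Int) (by omega) (by exact_mod_cast hk)).2
    rw [PySem.List.pyGetD_of_nonneg fList "" (by omega),
        PySem.List.pyGetD_of_nonneg parts "" (by omega)] at this
    have h1 : (i + (k : Int)).toNat = i.toNat + k := by omega
    have h2 : ((k : Int)).toNat = k := by omega
    rw [h1, h2] at this
    exact this

lemma delta_phrase (fList : List String) (name : String) (i : Int) (hi : 0 ≤ i)
    (h : PySem.Str.isIn " " name = true) (hne : PySem.Str.split₀ name ≠ []) :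
    deltaA fList name i
      = if i + ((PySem.Str.split₀ name).length : Int) ≤ (fList.length : Int)
            ∧ PySem.List.slice fList (some i) (some (i + ((PySem.Str.split₀ name).length : Int))) = PySem.Str.split₀ name
        then 1 else 0 := by
  have hm : 0 < (PySem.Str.split₀ name).length := List.length_pos_iff.mpr hne
  simp only [deltaA, aStep, if_neg (not_not_intro h), if_pos h]
  by_cases hlen : (fList.length : Int) - i ≥ ((PySem.Str.split₀ name).length : Int)
  · rw [if_pos hlen]
    have hle : i + ((PySem.Str.split₀ name).length : Int) ≤ (fList.length : Int) := by omega
    by_cases hs : PySem.List.slice fList (some i) (some (i + ((PySem.Str.split₀ name).length : Int))) = PySem.Str.split₀ name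
    · have hall := (slice_eq_iff fList (PySem.Str.split₀ name) i hi hle).mp hs
      have hm1 : aMatch fList (PySem.Str.split₀ name) i 0 = true :=
        (aMatch_iff fList (PySem.Str.split₀ name) i hi 0).mpr (fun k _ hk => hall k hk)
      rw [if_pos (show PySem.List.pyGetD fList i "" = PySem.List.pyGetD (PySem.Str.split₀ name) 0 "" by
            rw [PySem.List.pyGetD_of_nonneg fList "" hi, PySem.List.pyGetD_of_nonneg (PySem.Str.split₀ name) "" (by omega)]
            simpa using hall 0 hm),
          if_pos hm1, if_pos ⟨hle, hs⟩]
      norm_num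
    · by_cases hh : PySem.List.pyGetD fList i "" = PySem.List.pyGetD (PySem.Str.split₀ name) 0 ""
      · have hm0 : ¬ aMatch fList (PySem.Str.split₀ name) i 0 = true := fun hm1 =>
          hs ((slice_eq_iff fList (PySem.Str.split₀ name) i hi hle).mpr
            (fun k hk => (aMatch_iff fList (PySem.Str.split₀ name) i hi 0).mp hm1 k (Nat.zero_le k) hk))
        rw [if_pos hh, if_neg hm0, if_neg (show ¬ (i + ((PySem.Str.split₀ name).length : Int) ≤ (fList.length : Int) ∧ PySem.List.slice fList (some i) (some (i + ((PySem.Str.split₀ name).length : Int))) = PySem.Str.split₀ name) from fun hc => hs hc.2)]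
      · rw [if_neg hh, if_neg (show ¬ (i + ((PySem.Str.split₀ name).length : Int) ≤ (fList.length : Int) ∧ PySem.List.slice fList (some i) (some (i + ((PySem.Str.split₀ name).length : Int))) = PySem.Str.split₀ name) from fun hc => hs hc.2)]
  · rw [if_neg hlen, if_neg (fun hc => hlen (by have h1 := hc.1; omega))]

lemma per_name (fList : List String) (name : String)
    (hp : PySem.Str.isIn " " name = true → PySem.Str.split₀ name ≠ []) :
    ((PySem.List.pyRange 0 (fList.length : Int)).map (fun i => deltaA fList name i)).sum
      = bTermB fList name := by
  by_cases h : PySem.Str.isIn " " name = true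
  · -- phrase: B's intersection of shifted position sets
    have hne := hp h
    simp only [bTermB, if_neg (not_not_intro h)]
    rw [PySem.Set.ofList_eq_self_of_nodup _ (nodup_posIndex fList _),
        foldl_inter_filter, posIndex_getD, List.filter_filter, PySem.Set.len,
        ← List.countP_eq_length_filter,
        ← PySem.List.sum_map_ite_one_zero _ (PySem.List.pyRange 0 (fList.length : Int))]
    apply congrArg List.sum
    apply List.map_congr_left
    intro i hi
    obtain ⟨h0, hn⟩ := PySem.List.mem_pyRange_one.mp hi
    rw [delta_phrase fList name i h0 h hne]
    by_cases hc : (i + ((PySem.Str.split₀ name).length : Int) ≤ (fList.length : Int)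
        ∧ PySem.List.slice fList (some i) (some (i + ((PySem.Str.split₀ name).length : Int))) = PySem.Str.split₀ name)
    · rw [if_pos hc, if_pos ((cond_iff fList (PySem.Str.split₀ name) hne i h0 hn).mp hc)]
    · rw [if_neg hc, if_neg (fun hb => hc ((cond_iff fList (PySem.Str.split₀ name) hne i h0 hn).mpr hb))]
  · -- single word: B's position-list length
    simp only [bTermB, if_pos h]
    rw [posIndex_getD, ← List.countP_eq_length_filter,
        ← PySem.List.sum_map_ite_one_zero _ (PySem.List.pyRange 0 (fList.length : Int))]
    apply congrArg List.sum
    apply List.map_congr_left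
    intro i _
    simp only [deltaA, aStep, if_pos h, zero_add]
    by_cases hx : name = PySem.List.pyGetD fList i ""
    · rw [if_pos hx, if_pos (by simp [hx])]
    · rw [if_neg hx, if_neg (by simp; exact fun hc => hx hc.symm)]

-- ===== VERDICT (by name: the statement is the Claim_ definition above) =====
theorem countFrequenciesAccurateHelper_spec : Claim_equal_countFrequenciesAccurateHelper := by
  intro rList fList _ hpre
  unfold Spec_countFrequenciesAccurateHelper
  rw [A_eq_sum, B_eq_sum, sum_comm_list]
  congr 1
  exact List.map_congr_left (fun name hmem => per_name fList name (hpre name hmem))
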